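-- pv_equiv track=rewrite | github.com/ryan-cd/ctf | affinity-ctf-2020/TODO/task.py | unshift
-- ===== SOURCE A (Python) =====
-- def unshift(msg):
--     result = ''
--     back = ''
--     for i in range(len(msg)):
--         if i % 2 == 0:
--             result += msg[i]
--         else:
--             back += msg[i]
--     result += back[::-1]
--     return result
-- ===== SOURCE B (Python) =====
-- def unshift(msg):
--     # Closed-form output permutation: output position j takes msg[2*j] in the
--     # first half (even-indexed chars) and msg[2*(n-1-j)+1] in the second half
--     # (odd-indexed chars in reverse), assembled in one join -- no split lists,
--     # no reversal pass.
--     n = len(msg)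
--     h = (n + 1) // 2
--     return ''.join(msg[2 * j] if j < h else msg[2 * (n - 1 - j) + 1] for j in range(n))
-- ===== Notes on version B (the rewrite author's own statement) =====
-- stated objective: alternative
-- what changed: Replaces A's loop that accumulates two strings by parity and reverses one with a closed-form output permutation: position j of the result is read directly as msg[2*j] in the first half and msg[2*(n-1-j)+1] in the second, assembled by a single join with no split lists and no reversal pass.
import Mathlib
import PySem

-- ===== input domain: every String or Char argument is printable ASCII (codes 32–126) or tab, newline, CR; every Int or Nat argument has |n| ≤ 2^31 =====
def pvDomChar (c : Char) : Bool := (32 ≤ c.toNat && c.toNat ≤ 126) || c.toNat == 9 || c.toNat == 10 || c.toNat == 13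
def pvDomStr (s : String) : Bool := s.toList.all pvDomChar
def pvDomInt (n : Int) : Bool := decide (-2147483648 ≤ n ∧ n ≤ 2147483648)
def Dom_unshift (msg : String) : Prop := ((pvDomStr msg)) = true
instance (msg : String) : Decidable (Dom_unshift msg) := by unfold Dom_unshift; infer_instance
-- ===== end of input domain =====

-- B replaces A's split-accumulate-reverse loop by a closed-form output permutation:
-- output position j reads msg[2*j] in the first half and msg[2*(n-1-j)+1] in the second,
-- assembled in a single join (alternative decomposition, same value).

-- ===== PORT A =====
-- loop body: if i % 2 == 0: result += msg[i] else: back += msg[i]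
def unshiftStep (s : List Char) (acc : List Char × List Char) (i : Int) : List Char × List Char :=
  if i % 2 == 0 then (acc.1 ++ (PySem.List.pyGet? s i).toList, acc.2)
  else (acc.1, acc.2 ++ (PySem.List.pyGet? s i).toList)

def unshift (msg : String) : String :=
  let s := msg.toList
  let p := (PySem.List.pyRange 0 (s.length : Int) 1).foldl (unshiftStep s) ([], [])
  -- result += back[::-1]  (back[::-1] is reverse: PySem.List.slice?_none_none_neg_one)
  String.ofList (p.1 ++ p.2.reverse)

-- ===== PORT B =====
-- ''.join(msg[2*j] if j < h else msg[2*(n-1-j)+1] for j in range(n));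
-- msg[k] is PySem.List.pyGet? (none = IndexError), the join collects the characters.
def unshift_alt (msg : String) : String :=
  let s := msg.toList
  let n : Int := s.length
  let h : Int := PySem.Int.floordiv (n + 1) 2
  String.ofList (((PySem.List.pyRange 0 n 1).map (fun j =>
    if j < h then PySem.List.pyGet? s (2 * j)
    else PySem.List.pyGet? s (2 * (n - 1 - j) + 1))).flatMap Option.toList)

-- ===== PRECONDITION & SPEC =====
def Spec_unshift (msg : String) (out : String) : Prop := out = unshift_alt msg
instance (msg : String) (out : String) : Decidable (Spec_unshift msg out) := by unfold Spec_unshift; infer_instance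

-- ===== CLAIM (what is proved, stated in full; the proofs are below) =====
def Claim_equal_unshift : Prop := ∀ (msg : String), Dom_unshift msg → Spec_unshift msg (unshift msg)

-- ===== LEMMAS AND PROOFS =====

-- proof-side canonical form: the even-indexed and odd-indexed characters of a list
def splitEO : List Char → List Char × List Char
  | [] => ([], [])
  | c :: t => (c :: (splitEO t).2, (splitEO t).1)

lemma splitEO_len : ∀ s : List Char,
    (splitEO s).1.length = (s.length + 1) / 2 ∧ (splitEO s).2.length = s.length / 2 := by
  intro s
  induction s with
  | nil => simp [splitEO]
  | cons c t ih =>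
    obtain ⟨ih1, ih2⟩ := ih
    simp only [splitEO, List.length_cons, ih1, ih2]
    exact ⟨by omega, trivial⟩

lemma splitEO_get? : ∀ (s : List Char) (j : Nat),
    (splitEO s).1[j]? = s[2 * j]? ∧ (splitEO s).2[j]? = s[2 * j + 1]? := by
  intro s
  induction s with
  | nil => intro j; simp [splitEO]
  | cons c t ih =>
    intro j
    constructor
    · cases j with
      | zero => simp [splitEO]
      | succ m =>
        have h1 := (ih m).2
        have h2 : 2 * (m + 1) = (2 * m + 1) + 1 := by ring
        simp only [splitEO, List.getElem?_cons_succ, h1, h2]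
    · have h1 := (ih j).1
      simp only [splitEO, List.getElem?_cons_succ, h1]

-- A's loop computes splitEO
lemma unshift_loop (s : List Char) :
    ∀ (n a : Nat) (e o : List Char), n = s.length - a →
    (PySem.List.pyRange (a : Int) (s.length : Int) 1).foldl (unshiftStep s) (e, o) =
      if a % 2 = 0 then (e ++ (splitEO (s.drop a)).1, o ++ (splitEO (s.drop a)).2)
      else (e ++ (splitEO (s.drop a)).2, o ++ (splitEO (s.drop a)).1) := by
  intro n
  induction n with
  | zero =>
    intro a e o hn
    have hge : s.length ≤ a := by omega
    rw [PySem.List.pyRange_one_eq_nil (by exact_mod_cast hge)]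
    rw [List.drop_eq_nil_of_le hge]
    split <;> simp [splitEO]
  | succ m ih =>
    intro a e o hn
    have hlt : a < s.length := by omega
    rw [PySem.List.pyRange_one_cons (by exact_mod_cast hlt)]
    have hget : PySem.List.pyGet? s (a : Int) = some s[a] := by
      simp [PySem.List.pyGet?_natCast, List.getElem?_eq_getElem hlt]
    have hdrop : s.drop a = s[a] :: s.drop (a + 1) := List.drop_eq_getElem_cons hlt
    have hcast : ((a : Int) + 1) = ((a + 1 : Nat) : Int) := by push_cast; ring
    by_cases hpar : a % 2 = 0
    · have hb : ((a : Int) % 2 == 0) = true := by simp; omega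
      simp only [List.foldl_cons, unshiftStep, hb, if_true, hget, Option.toList_some]
      rw [hcast, ih (a + 1) (e ++ [s[a]]) o (by omega)]
      have hpar1 : ¬ (a + 1) % 2 = 0 := by omega
      rw [if_neg hpar1, if_pos hpar, hdrop]
      simp [splitEO]
    · have hb : ((a : Int) % 2 == 0) = false := by simp; omega
      simp only [List.foldl_cons, unshiftStep, hb, Bool.false_eq_true, if_false, hget,
        Option.toList_some]
      rw [hcast, ih (a + 1) e (o ++ [s[a]]) (by omega)]
      have hpar1 : (a + 1) % 2 = 0 := by omega
      rw [if_pos hpar1, if_neg hpar, hdrop]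
      simp [splitEO]

-- flatMap of a map producing singleton options is the map of their values
lemma flatMap_toList_map_some {α β : Type} (l : List α) (v : α → β) :
    (l.map (fun k => some (v k))).flatMap Option.toList = l.map v := by
  induction l with
  | nil => simp
  | cons a t ih => simp [ih]

-- B's mapped list is the canonical form, too
lemma unshift_alt_list (s : List Char) :
    (((PySem.List.pyRange 0 (s.length : Int) 1).map (fun j =>
      if j < PySem.Int.floordiv ((s.length : Int) + 1) 2 then PySem.List.pyGet? s (2 * j)
      else PySem.List.pyGet? s (2 * ((s.length : Int) - 1 - j) + 1))).flatMap Option.toList)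
    = (splitEO s).1 ++ (splitEO s).2.reverse := by
  set L := s.length with hL
  obtain ⟨hl1, hl2⟩ := splitEO_len s
  have hsome : ∀ i, i < L → s[i]? = some (s.getD i 'A') := by
    intro i hi
    rw [List.getElem?_eq_getElem hi, List.getD_eq_getElem s 'A' hi]
  have hh : PySem.Int.floordiv ((L : Int) + 1) 2 = (((L + 1) / 2 : Nat) : Int) := by
    have hc1 : ((L : Int) + 1) = ((L + 1 : Nat) : Int) := by push_cast; ring
    rw [hc1]; exact_mod_cast PySem.Int.floordiv_natCast (L + 1) 2
  have hrange : PySem.List.pyRange 0 (L : Int) 1 = (List.range L).map (fun k : Nat => (k : Int)) := by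
    rw [PySem.List.pyRange_one]
    simp
  rw [hrange, List.map_map]
  have hmap : (List.range L).map ((fun j =>
      if j < PySem.Int.floordiv ((L : Int) + 1) 2 then PySem.List.pyGet? s (2 * j)
      else PySem.List.pyGet? s (2 * ((L : Int) - 1 - j) + 1)) ∘ (fun k : Nat => (k : Int)))
      = (List.range L).map (fun k => some (if k < (L + 1) / 2 then s.getD (2 * k) 'A'
          else s.getD (2 * (L - 1 - k) + 1) 'A')) := by
    apply List.map_congr_left
    intro k hk
    have hkL : k < L := List.mem_range.mp hk
    simp only [Function.comp]
    rw [hh]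
    by_cases hc : k < (L + 1) / 2
    · rw [if_pos (by exact_mod_cast hc), if_pos hc]
      have he : (2 : Int) * (k : Int) = ((2 * k : Nat) : Int) := by push_cast; ring
      rw [he, PySem.List.pyGet?_natCast, hsome (2 * k) (by omega)]
    · rw [if_neg (by exact_mod_cast hc), if_neg hc]
      have he : (2 : Int) * ((L : Int) - 1 - (k : Int)) + 1 = ((2 * (L - 1 - k) + 1 : Nat) : Int) := by
        push_cast [Nat.cast_sub (by omega : 1 + k ≤ L)]; omega
      rw [he, PySem.List.pyGet?_natCast, hsome (2 * (L - 1 - k) + 1) (by omega)]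
  rw [hmap, flatMap_toList_map_some]
  apply List.ext_getElem?
  intro j
  by_cases hj : j < L
  · rw [List.getElem?_map, List.getElem?_range hj, Option.map_some]
    by_cases hc : j < (L + 1) / 2
    · rw [if_pos hc]
      rw [List.getElem?_append_left (by omega : j < (splitEO s).1.length)]
      rw [(splitEO_get? s j).1, hsome (2 * j) (by omega)]
    · rw [if_neg hc]
      rw [List.getElem?_append_right (by omega : (splitEO s).1.length ≤ j)]
      rw [List.getElem?_reverse (by omega : j - (splitEO s).1.length < (splitEO s).2.length)]
      rw [(splitEO_get? s _).2]
      have hidx : 2 * ((splitEO s).2.length - 1 - (j - (splitEO s).1.length)) + 1 = 2 * (L - 1 - j) + 1 := by omega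
      rw [hidx, hsome (2 * (L - 1 - j) + 1) (by omega)]
  · rw [List.getElem?_eq_none (by simp; omega), List.getElem?_eq_none (by simp; omega)]

-- ===== VERDICT (by name: the statement is the Claim_ definition above) =====
theorem unshift_spec : Claim_equal_unshift := by
  intro msg _
  unfold Spec_unshift unshift unshift_alt
  have h := unshift_loop msg.toList msg.toList.length 0 [] [] (by omega)
  simp only [Nat.cast_zero, Nat.zero_mod, List.drop_zero, List.nil_append, if_true] at h
  simp only [h, unshift_alt_list]
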